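-- pv_equiv track=rewrite | github.com/richkingsford/cub-queso | setup_manual_training.py | resolve_attempt_token
-- ===== SOURCE A (Python) =====
-- ATTEMPT_CODES = {
--     "f": "FAIL",
--     "s": "SUCCESS",
--     "r": "RECOVER",
--     "n": "NOMINAL",
-- }
--
-- ATTEMPT_NAMES = {
--     "fail": "FAIL",
--     "failure": "FAIL",
--     "success": "SUCCESS",
--     "recover": "RECOVER",
--     "recovery": "RECOVER",
--     "nominal": "NOMINAL",
--     "nom": "NOMINAL",
-- }
--
-- def resolve_attempt_token(token):
--     if not token:
--         return None
--     key = token.strip().lower()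
--     if key in ATTEMPT_CODES:
--         return ATTEMPT_CODES[key]
--     if key in ATTEMPT_NAMES:
--         return ATTEMPT_NAMES[key]
--     for name, attempt in ATTEMPT_NAMES.items():
--         if name.startswith(key):
--             return attempt
--     return None
-- ===== SOURCE B (Python) =====
-- ATTEMPT_NAMES = {
--     "fail": "FAIL",
--     "failure": "FAIL",
--     "success": "SUCCESS",
--     "recover": "RECOVER",
--     "recovery": "RECOVER",
--     "nominal": "NOMINAL",
--     "nom": "NOMINAL",
-- }
--
-- # Built once: every prefix of every name (including ""), first name wins.
-- PREFIX_INDEX = {}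
-- for _name, _attempt in ATTEMPT_NAMES.items():
--     for _i in range(len(_name) + 1):
--         PREFIX_INDEX.setdefault(_name[:_i], _attempt)
--
-- def resolve_attempt_token(token):
--     if not token:
--         return None
--     return PREFIX_INDEX.get(token.strip().lower())
-- ===== Notes on version B (the rewrite author's own statement) =====
-- stated objective: faster
-- what changed: Replaces A's two dict membership tests plus a linear startswith scan over ATTEMPT_NAMES with a prefix table built once at module load (every prefix of every name, first name wins) and a single dict lookup.
import Mathlib
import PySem

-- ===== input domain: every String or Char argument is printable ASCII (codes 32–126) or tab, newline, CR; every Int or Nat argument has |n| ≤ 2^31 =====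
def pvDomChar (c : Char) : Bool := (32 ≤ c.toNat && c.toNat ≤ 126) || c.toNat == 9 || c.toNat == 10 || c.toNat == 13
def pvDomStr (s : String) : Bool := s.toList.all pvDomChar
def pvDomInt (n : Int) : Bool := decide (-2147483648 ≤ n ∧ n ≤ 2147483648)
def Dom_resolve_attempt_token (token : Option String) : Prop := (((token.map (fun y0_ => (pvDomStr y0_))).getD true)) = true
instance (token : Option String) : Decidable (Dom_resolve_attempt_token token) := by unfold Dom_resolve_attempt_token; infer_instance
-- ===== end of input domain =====

-- B replaces A's code/name dict lookups plus a startswith scan by one prefix table built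
-- once from ATTEMPT_NAMES (first name wins) and a single dictionary lookup ('alternative').

-- ===== PORT A =====
def pvAttemptCodes : PySem.Dict String String :=
  PySem.Dict.ofList [("f", "FAIL"), ("s", "SUCCESS"), ("r", "RECOVER"), ("n", "NOMINAL")]

def pvAttemptNames : PySem.Dict String String :=
  PySem.Dict.ofList [("fail", "FAIL"), ("failure", "FAIL"), ("success", "SUCCESS"),
    ("recover", "RECOVER"), ("recovery", "RECOVER"), ("nominal", "NOMINAL"), ("nom", "NOMINAL")]

-- the 'for name, attempt in ATTEMPT_NAMES.items(): if name.startswith(key): return attempt' loop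
def pvScanNames (items : List (String × String)) (key : String) : Option String :=
  match items with
  | [] => none
  | (name, attempt) :: rest =>
    if PySem.Str.startswith name key then some attempt else pvScanNames rest key

def resolve_attempt_token (token : Option String) : Option String :=
  match token with
  | none => none
  | some t =>
    if t = "" then none
    else
      let key := PySem.Str.lower (PySem.Str.strip t)
      if pvAttemptCodes.contains key then pvAttemptCodes.get? key
      else if pvAttemptNames.contains key then pvAttemptNames.get? key
      else pvScanNames pvAttemptNames.items key

-- ===== PORT B =====
-- PREFIX_INDEX: every prefix name[:i] of every name, first name wins (setdefault)
def pvPrefixIndex : PySem.Dict String String :=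
  [("fail", "FAIL"), ("failure", "FAIL"), ("success", "SUCCESS"),
   ("recover", "RECOVER"), ("recovery", "RECOVER"), ("nominal", "NOMINAL"),
   ("nom", "NOMINAL")].foldl
    (fun d nv =>
      (PySem.List.pyRange 0 ((PySem.Str.len nv.1 : Int) + 1) 1).foldl
        (fun d i => d.setdefault (PySem.Str.slice nv.1 none (some i)) nv.2) d)
    PySem.Dict.empty

def resolve_attempt_token_alt (token : Option String) : Option String :=
  match token with
  | none => none
  | some t =>
    if t = "" then none
    else pvPrefixIndex.get? (PySem.Str.lower (PySem.Str.strip t))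

-- ===== PRECONDITION & SPEC =====
def Spec_resolve_attempt_token (token : Option String) (out : Option String) : Prop := out = resolve_attempt_token_alt token
instance (token : Option String) (out : Option String) : Decidable (Spec_resolve_attempt_token token out) := by unfold Spec_resolve_attempt_token; infer_instance

-- ===== CLAIM (what is proved, stated in full; the proofs are below) =====
def Claim_equal_resolve_attempt_token : Prop := ∀ (token : Option String), Dom_resolve_attempt_token token → Spec_resolve_attempt_token token (resolve_attempt_token token)

-- ===== LEMMAS AND PROOFS =====

-- all 30 keys of the prefix table
def pvL30 : List String :=
  ["", "f", "fa", "fai", "fail", "failu", "failur", "failure",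
   "s", "su", "suc", "succ", "succe", "succes", "success",
   "r", "re", "rec", "reco", "recov", "recove", "recover", "recovery",
   "n", "no", "nom", "nomi", "nomin", "nomina", "nominal"]

lemma pvMemOfInits (k s : String) (L : List String)
    (h : s.toList.inits = L.map String.toList) (hm : k.toList ∈ s.toList.inits) : k ∈ L := by
  rw [h] at hm
  rcases List.mem_map.mp hm with ⟨a, ha, hae⟩
  exact (String.toList_injective hae) ▸ ha

set_option maxRecDepth 8192 in
set_option maxHeartbeats 1000000 in
lemma pvCore (k : String) :
    (if pvAttemptCodes.contains k then pvAttemptCodes.get? k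
     else if pvAttemptNames.contains k then pvAttemptNames.get? k
     else pvScanNames pvAttemptNames.items k) = pvPrefixIndex.get? k := by
  by_cases hk : k ∈ pvL30
  · fin_cases hk <;> decide
  · have hcC : pvAttemptCodes.contains k = false := by
      cases hB : pvAttemptCodes.contains k
      · rfl
      · exfalso; apply hk
        have hm : k ∈ pvAttemptCodes.keys := (PySem.Dict.contains_iff_mem_keys _ _).mp hB
        have hkeys : pvAttemptCodes.keys = ["f", "s", "r", "n"] := by decide
        rw [hkeys] at hm
        fin_cases hm <;> decide
    have hcN : pvAttemptNames.contains k = false := by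
      cases hB : pvAttemptNames.contains k
      · rfl
      · exfalso; apply hk
        have hm : k ∈ pvAttemptNames.keys := (PySem.Dict.contains_iff_mem_keys _ _).mp hB
        have hkeys : pvAttemptNames.keys =
            ["fail", "failure", "success", "recover", "recovery", "nominal", "nom"] := by decide
        rw [hkeys] at hm
        fin_cases hm <;> decide
    have hsw : ∀ s ∈ ["fail", "failure", "success", "recover", "recovery", "nominal", "nom"],
        PySem.Str.startswith s k = false := by
      intro s hs
      cases hB : PySem.Str.startswith s k
      · rfl
      · exfalso; apply hk
        have hpre : k.toList <+: s.toList := by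
          rw [PySem.Str.startswith_eq] at hB
          exact (PySem.Chars.startswith_iff _ _).mp hB
        have hm : k.toList ∈ s.toList.inits := (List.mem_inits _ _).mpr hpre
        fin_cases hs
        · have := pvMemOfInits k "fail" ["", "f", "fa", "fai", "fail"] (by decide) hm
          fin_cases this <;> decide
        · have := pvMemOfInits k "failure"
            ["", "f", "fa", "fai", "fail", "failu", "failur", "failure"] (by decide) hm
          fin_cases this <;> decide
        · have := pvMemOfInits k "success"
            ["", "s", "su", "suc", "succ", "succe", "succes", "success"] (by decide) hm
          fin_cases this <;> decide
        · have := pvMemOfInits k "recover"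
            ["", "r", "re", "rec", "reco", "recov", "recove", "recover"] (by decide) hm
          fin_cases this <;> decide
        · have := pvMemOfInits k "recovery"
            ["", "r", "re", "rec", "reco", "recov", "recove", "recover", "recovery"] (by decide) hm
          fin_cases this <;> decide
        · have := pvMemOfInits k "nominal"
            ["", "n", "no", "nom", "nomi", "nomin", "nomina", "nominal"] (by decide) hm
          fin_cases this <;> decide
        · have := pvMemOfInits k "nom" ["", "n", "no", "nom"] (by decide) hm
          fin_cases this <;> decide
    have hscan : pvScanNames pvAttemptNames.items k = none := by
      have h1 := hsw "fail" (by decide)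
      have h2 := hsw "failure" (by decide)
      have h3 := hsw "success" (by decide)
      have h4 := hsw "recover" (by decide)
      have h5 := hsw "recovery" (by decide)
      have h6 := hsw "nominal" (by decide)
      have h7 := hsw "nom" (by decide)
      have hit : pvAttemptNames.items =
          [("fail", "FAIL"), ("failure", "FAIL"), ("success", "SUCCESS"),
           ("recover", "RECOVER"), ("recovery", "RECOVER"), ("nominal", "NOMINAL"),
           ("nom", "NOMINAL")] := by decide
      rw [hit]
      simp at h1 h2 h3 h4 h5 h6 h7
      simp [pvScanNames, h1, h2, h3, h4, h5, h6, h7]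
    have hPk : pvPrefixIndex.get? k = none := by
      cases hB : pvPrefixIndex.get? k with
      | none => rfl
      | some v =>
        exfalso; apply hk
        have hm : k ∈ pvPrefixIndex.keys :=
          PySem.Dict.mem_keys_of_mem_items _ (PySem.Dict.mem_items_of_get?_eq_some _ hB)
        have hkeys : pvPrefixIndex.keys = pvL30 := by decide
        rw [hkeys] at hm
        exact hm
    simp [hcC, hcN, hscan, hPk]

-- ===== VERDICT (by name: the statement is the Claim_ definition above) =====
theorem resolve_attempt_token_spec : Claim_equal_resolve_attempt_token := by
  intro token _
  unfold Spec_resolve_attempt_token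
  cases token with
  | none => rfl
  | some t =>
    show (if t = "" then none
          else
            let key := PySem.Str.lower (PySem.Str.strip t)
            if pvAttemptCodes.contains key then pvAttemptCodes.get? key
            else if pvAttemptNames.contains key then pvAttemptNames.get? key
            else pvScanNames pvAttemptNames.items key) =
        (if t = "" then none
         else pvPrefixIndex.get? (PySem.Str.lower (PySem.Str.strip t)))
    by_cases ht : t = ""
    · rw [if_pos ht, if_pos ht]
    · rw [if_neg ht, if_neg ht]
      exact pvCore _
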